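-- pv_equiv track=rewrite | github.com/1ce2k/iti0102-2023 | XP/xp01_bees/bees.py | cells_count
-- ===== SOURCE A (Python) =====
-- def cells_count(honeycomb_width: int) -> int:
--     """Return cells count."""
--     if honeycomb_width <= 0:
--         return 0
--     hex_size = 0
--     for i in range(honeycomb_width):
--         hex_size += honeycomb_width + i
--     hex_size = hex_size * 2 - (2 * honeycomb_width - 1)
--     return hex_size
-- ===== SOURCE B (Python) =====
-- def cells_count(honeycomb_width: int) -> int:
--     """Return cells count (closed form: centered hexagonal number)."""
--     if honeycomb_width <= 0:
--         return 0
--     w = honeycomb_width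
--     return 3 * w * w - 3 * w + 1
-- ===== Notes on version B (the rewrite author's own statement) =====
-- stated objective: faster
-- what changed: Replaced the O(n) accumulation loop with the closed-form centered-hexagonal-number formula evaluated in constant time.
import Mathlib
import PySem

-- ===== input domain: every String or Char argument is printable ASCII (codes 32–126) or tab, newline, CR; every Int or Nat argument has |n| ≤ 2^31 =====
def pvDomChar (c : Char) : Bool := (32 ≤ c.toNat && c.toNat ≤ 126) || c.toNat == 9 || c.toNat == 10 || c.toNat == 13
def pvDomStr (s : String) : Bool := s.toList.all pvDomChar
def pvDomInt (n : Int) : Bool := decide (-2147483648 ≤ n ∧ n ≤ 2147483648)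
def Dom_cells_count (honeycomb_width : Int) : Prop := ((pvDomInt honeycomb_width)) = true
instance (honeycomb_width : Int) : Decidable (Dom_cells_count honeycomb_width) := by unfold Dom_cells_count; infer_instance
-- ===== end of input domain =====

-- B replaces A's O(n) accumulation loop with the O(1) closed form 3*w*w - 3*w + 1.

-- ===== PORT A =====
def cells_count (honeycomb_width : Int) : Int :=
  if honeycomb_width ≤ 0 then 0
  else
    let hex_size :=
      (PySem.List.pyRange 0 honeycomb_width 1).foldl
        (fun acc i => acc + (honeycomb_width + i)) 0
    hex_size * 2 - (2 * honeycomb_width - 1)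

-- ===== PORT B =====
def cells_count_alt (honeycomb_width : Int) : Int :=
  if honeycomb_width ≤ 0 then 0
  else 3 * honeycomb_width * honeycomb_width - 3 * honeycomb_width + 1

-- ===== PRECONDITION & SPEC =====
def Spec_cells_count (honeycomb_width : Int) (out : Int) : Prop := out = cells_count_alt honeycomb_width
instance (honeycomb_width : Int) (out : Int) : Decidable (Spec_cells_count honeycomb_width out) := by unfold Spec_cells_count; infer_instance

-- ===== CLAIM (what is proved, stated in full; the proofs are below) =====
def Claim_equal_cells_count : Prop := ∀ (honeycomb_width : Int), Dom_cells_count honeycomb_width → Spec_cells_count honeycomb_width (cells_count honeycomb_width)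

-- ===== LEMMAS AND PROOFS =====

lemma cells_sum_lemma (w : Int) (n : Nat) :
    2 * ((PySem.List.pyRange 0 n 1).foldl (fun acc i => acc + (w + i)) 0)
      = 2 * n * w + n * (n - 1) := by
  induction n with
  | zero => simp [PySem.List.pyRange_one_eq_nil]
  | succ m ih =>
    have h : PySem.List.pyRange 0 ((m : Int) + 1) 1
        = PySem.List.pyRange 0 m 1 ++ [(m : Int)] :=
      PySem.List.pyRange_one_succ_right (by exact_mod_cast Nat.zero_le m)
    push_cast
    push_cast at ih
    rw [h, List.foldl_append]
    simp only [List.foldl]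
    ring_nf
    ring_nf at ih
    omega

-- ===== VERDICT (by name: the statement is the Claim_ definition above) =====
theorem cells_count_spec : Claim_equal_cells_count := by
  intro w _
  unfold Spec_cells_count cells_count cells_count_alt
  by_cases hw : w ≤ 0
  · simp [hw]
  · simp only [hw, if_false]
    have hwn : ((w.toNat : Int)) = w := Int.toNat_of_nonneg (by omega)
    have := cells_sum_lemma w w.toNat
    rw [hwn] at this
    linear_combination this
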